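-- pv_equiv track=rewrite | github.com/pypi-data/pypi-mirror-403 | packages/psaiops/psaiops-0.6.3.tar.gz/psaiops-0.6.3/psaiops/score/router/lib.py | postprocess_focus_cls
-- ===== SOURCE A (Python) =====
-- def postprocess_focus_cls(
--     left_idx: int,
--     right_idx: int,
--     token_dim: int,
-- ) -> list:
--     __left_idx = max(-1, min(token_dim, left_idx))
--     __right_idx = max(-1, min(token_dim, right_idx))
--     # class 1 for the token(s) focused on the left, 0 for the rest
--     __left_cls = token_dim * [1] if (__left_idx < 0) else [int(__i == __left_idx) for __i in range(token_dim)]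
--     # class 2 for the token(s) focused on the right, 0 for the rest
--     __right_cls = token_dim * [2] if (__right_idx < 0) else [2 * int(__i == __right_idx) for __i in range(token_dim)]
--     # sum the classes so that the overlap has class 3
--     return [str(__l + __r) for __l, __r in zip(__left_cls, __right_cls)]
-- ===== SOURCE B (Python) =====
-- def postprocess_focus_cls(
--     left_idx: int,
--     right_idx: int,
--     token_dim: int,
-- ) -> list:
--     l = max(-1, min(token_dim, left_idx))
--     r = max(-1, min(token_dim, right_idx))
--     # out-of-range focus (clamped to -1) marks every token with that class
--     base = (1 if l < 0 else 0) + (2 if r < 0 else 0)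
--     result = [base] * max(token_dim, 0)
--     if 0 <= l < token_dim:
--         result[l] += 1
--     if 0 <= r < token_dim:
--         result[r] += 2
--     return [str(v) for v in result]
-- ===== Notes on version B (the rewrite author's own statement) =====
-- stated objective: simpler
-- what changed: Replaces the two full per-token indicator lists and the zip/sum pass by one base-filled list with at most two in-place sparse increments at the clamped indices.
import Mathlib
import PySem

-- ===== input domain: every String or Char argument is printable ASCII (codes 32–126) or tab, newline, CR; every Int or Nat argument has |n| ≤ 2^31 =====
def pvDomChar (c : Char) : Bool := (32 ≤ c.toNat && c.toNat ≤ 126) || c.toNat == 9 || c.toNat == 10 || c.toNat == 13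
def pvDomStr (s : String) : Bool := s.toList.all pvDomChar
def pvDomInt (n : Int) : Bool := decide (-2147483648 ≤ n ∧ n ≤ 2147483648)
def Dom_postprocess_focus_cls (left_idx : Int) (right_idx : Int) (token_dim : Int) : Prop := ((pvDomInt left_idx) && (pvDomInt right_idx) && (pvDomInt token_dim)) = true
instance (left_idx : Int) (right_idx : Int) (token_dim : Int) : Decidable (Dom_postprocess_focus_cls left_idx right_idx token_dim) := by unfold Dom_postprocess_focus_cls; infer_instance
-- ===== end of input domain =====

-- B replaces A's two full indicator lists + zip by a base-fill with two sparse increments (objective: simpler).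
-- ===== PORT A =====
def postprocess_focus_cls (left_idx : Int) (right_idx : Int) (token_dim : Int) : List String :=
  let l := max (-1) (min token_dim left_idx)
  let r := max (-1) (min token_dim right_idx)
  let leftCls : List Int :=
    if l < 0 then List.replicate token_dim.toNat 1
    else (PySem.List.pyRange 0 token_dim 1).map (fun i => if i == l then (1 : Int) else 0)
  let rightCls : List Int :=
    if r < 0 then List.replicate token_dim.toNat 2
    else (PySem.List.pyRange 0 token_dim 1).map (fun i => 2 * (if i == r then (1 : Int) else 0))
  (leftCls.zip rightCls).map (fun p => PySem.Int.toStr (p.1 + p.2))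

-- ===== PORT B =====
def postprocess_focus_cls_alt (left_idx : Int) (right_idx : Int) (token_dim : Int) : List String :=
  let l := max (-1) (min token_dim left_idx)
  let r := max (-1) (min token_dim right_idx)
  let base : Int := (if l < 0 then 1 else 0) + (if r < 0 then 2 else 0)
  let result := List.replicate (max token_dim 0).toNat base
  let result := if 0 ≤ l ∧ l < token_dim then result.modify l.toNat (· + 1) else result
  let result := if 0 ≤ r ∧ r < token_dim then result.modify r.toNat (· + 2) else result
  result.map (fun v => PySem.Int.toStr v)

-- ===== PRECONDITION & SPEC =====
def Spec_postprocess_focus_cls (left_idx : Int) (right_idx : Int) (token_dim : Int) (out : List String) : Prop := out = postprocess_focus_cls_alt left_idx right_idx token_dim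
instance (left_idx : Int) (right_idx : Int) (token_dim : Int) (out : List String) : Decidable (Spec_postprocess_focus_cls left_idx right_idx token_dim out) := by unfold Spec_postprocess_focus_cls; infer_instance

-- ===== CLAIM (what is proved, stated in full; the proofs are below) =====
def Claim_equal_postprocess_focus_cls : Prop := ∀ (left_idx : Int) (right_idx : Int) (token_dim : Int), Dom_postprocess_focus_cls left_idx right_idx token_dim → Spec_postprocess_focus_cls left_idx right_idx token_dim (postprocess_focus_cls left_idx right_idx token_dim)

-- ===== LEMMAS AND PROOFS =====
theorem ports_eq (left_idx right_idx token_dim : Int) :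
    postprocess_focus_cls left_idx right_idx token_dim = postprocess_focus_cls_alt left_idx right_idx token_dim := by
  unfold postprocess_focus_cls postprocess_focus_cls_alt
  dsimp only
  set l := max (-1) (min token_dim left_idx) with hl
  set r := max (-1) (min token_dim right_idx) with hr
  have hlc := max_choice (-1) (min token_dim left_idx)
  have hlm := min_le_left token_dim left_idx
  have hrc := max_choice (-1) (min token_dim right_idx)
  have hrm := min_le_left token_dim right_idx
  rw [← hl] at hlc
  rw [← hr] at hrc
  split_ifs
  all_goals refine List.ext_getElem (by simp [PySem.List.length_pyRange_one]; omega) ?_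
  all_goals intro i hi1 hi2
  all_goals
    have hi : i < token_dim.toNat := by
      simp only [List.length_map, List.length_modify, List.length_replicate] at hi2
      omega
  all_goals simp only [List.getElem_map, List.getElem_zip]
  all_goals try congr 1
  all_goals simp [List.getElem_replicate, List.getElem_modify,
    PySem.List.getElem_pyRange_one, beq_iff_eq]
  all_goals try split_ifs
  all_goals omega

-- ===== VERDICT (by name: the statement is the Claim_ definition above) =====
theorem postprocess_focus_cls_spec : Claim_equal_postprocess_focus_cls := by
  intro l r n _
  exact ports_eq l r n
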